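-- pv_equiv track=rewrite | github.com/brndnjrz/ML-technical-analysis | src/utils/options_optimizer.py | _generate_expiries
-- ===== SOURCE A (Python) =====
-- from typing import Dict, Any, List, Tuple, Optional
--
-- def _generate_expiries(days_range: Tuple[int, int]) -> List[int]:
--     """Generate realistic expiry dates (in days)"""
--     min_dte, max_dte = days_range
--
--     # Focus on common expiry dates: weekly and monthly
--     expiries = []
--
--     # Weekly expiries (every 7 days)
--     for dte in range(7, min(max_dte + 1, 35), 7):
--         if dte >= min_dte:
--             expiries.append(dte)
--
--     # Monthly expiries (approximately)
--     for dte in [30, 45, 60]: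
--         if min_dte <= dte <= max_dte:
--             expiries.append(dte)
--
--     return sorted(list(set(expiries)))
-- ===== SOURCE B (Python) =====
-- from typing import Tuple, List
--
-- # Fixed candidate expiries: A's weekly range can only ever produce 7/14/21/28
-- # (capped below 35 and bounded by max_dte), plus the monthly 30/45/60.
-- _CANDIDATES = (7, 14, 21, 28, 30, 45, 60)
--
-- def _generate_expiries(days_range: Tuple[int, int]) -> List[int]:
--     min_dte, max_dte = days_range
--     return sorted(v for v in _CANDIDATES if min_dte <= v <= max_dte)
-- ===== Notes on version B (the rewrite author's own statement) =====
-- stated objective: simpler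
-- what changed: Replaces A's two differently-shaped loops (an arithmetic range with a one-sided filter building a list, plus a literal list with a two-sided filter, then set-dedup and sort) by a single filter of the fixed candidate list [7,14,21,28,30,45,60] against min_dte <= v <= max_dte.
import Mathlib
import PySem

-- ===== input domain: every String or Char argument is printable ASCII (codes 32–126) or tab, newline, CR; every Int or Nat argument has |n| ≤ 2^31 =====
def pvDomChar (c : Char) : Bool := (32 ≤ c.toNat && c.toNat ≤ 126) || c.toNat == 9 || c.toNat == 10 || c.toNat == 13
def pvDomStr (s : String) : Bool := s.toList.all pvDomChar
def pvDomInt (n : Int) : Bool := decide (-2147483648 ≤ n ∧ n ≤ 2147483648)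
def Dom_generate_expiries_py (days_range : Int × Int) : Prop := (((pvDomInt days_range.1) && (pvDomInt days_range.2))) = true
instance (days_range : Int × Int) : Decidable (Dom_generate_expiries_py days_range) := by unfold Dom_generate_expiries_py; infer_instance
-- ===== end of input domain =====

-- B replaces A's two differently-shaped loops with one filter over a fixed sorted candidate list (simpler).

-- ===== PORT A =====
def generate_expiries_py (days_range : Int × Int) : List Int :=
  let min_dte := days_range.1
  let max_dte := days_range.2
  let expiries : List Int := []
  -- weekly expiries: for dte in range(7, min(max_dte + 1, 35), 7)
  let expiries := (PySem.List.pyRange 7 (min (max_dte + 1) 35) 7).foldl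
      (fun acc dte => if min_dte ≤ dte then acc ++ [dte] else acc) expiries
  -- monthly expiries: for dte in [30, 45, 60]
  let expiries := ([30, 45, 60] : List Int).foldl
      (fun acc dte => if min_dte ≤ dte ∧ dte ≤ max_dte then acc ++ [dte] else acc) expiries
  PySem.List.sorted (PySem.Set.ofList expiries) (fun x => x)

-- ===== PORT B =====
def pvCandidates : List Int := [7, 14, 21, 28, 30, 45, 60]

def generate_expiries_py_alt (days_range : Int × Int) : List Int :=
  PySem.List.sorted
    (pvCandidates.filter (fun v => decide (days_range.1 ≤ v ∧ v ≤ days_range.2)))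
    (fun x => x)

-- ===== PRECONDITION & SPEC =====
def Spec_generate_expiries_py (days_range : Int × Int) (out : List Int) : Prop := out = generate_expiries_py_alt days_range
instance (days_range : Int × Int) (out : List Int) : Decidable (Spec_generate_expiries_py days_range out) := by unfold Spec_generate_expiries_py; infer_instance

-- ===== CLAIM (what is proved, stated in full; the proofs are below) =====
def Claim_equal_generate_expiries_py : Prop := ∀ (days_range : Int × Int), Dom_generate_expiries_py days_range → Spec_generate_expiries_py days_range (generate_expiries_py days_range)

-- ===== LEMMAS AND PROOFS =====

-- A's weekly range is exactly the weekly candidates below the clamped stop.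
lemma pyRange_weekly (s : Int) (hs : s ≤ 35) :
    PySem.List.pyRange 7 s 7 = ([7, 14, 21, 28] : List Int).filter (fun v => decide (v < s)) := by
  by_cases h7 : s ≤ 7
  · rw [PySem.List.pyRange_of_pos 7 s (by norm_num)]
    have h : ¬ (7 : Int) < s := by omega
    have e7 : decide ((7 : Int) < s) = false := by simp; omega
    have e14 : decide ((14 : Int) < s) = false := by simp; omega
    have e21 : decide ((21 : Int) < s) = false := by simp; omega
    have e28 : decide ((28 : Int) < s) = false := by simp; omega
    simp [h, List.filter, e14, e21, e28]
  · have h8 : 8 ≤ s := by omega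
    interval_cases s <;> decide

lemma filter_weekly (min_dte max_dte : Int) :
    ([7, 14, 21, 28] : List Int).filter
        (fun v => decide (min_dte ≤ v) && decide (v < min (max_dte + 1) 35))
      = ([7, 14, 21, 28] : List Int).filter
        (fun v => decide (min_dte ≤ v ∧ v ≤ max_dte)) := by
  apply List.filter_congr
  intro v hv
  have hv28 : v ≤ 28 := by fin_cases hv <;> norm_num
  by_cases h1 : min_dte ≤ v <;> by_cases h2 : v ≤ max_dte <;>
    simp [h1, h2]; omega

-- ===== VERDICT (by name: the statement is the Claim_ definition above) =====
theorem generate_expiries_py_spec : Claim_equal_generate_expiries_py := by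
  intro dr _
  obtain ⟨mn, mx⟩ := dr
  show PySem.List.sorted (PySem.Set.ofList
      (([30, 45, 60] : List Int).foldl
        (fun acc dte => if mn ≤ dte ∧ dte ≤ mx then acc ++ [dte] else acc)
        ((PySem.List.pyRange 7 (min (mx + 1) 35) 7).foldl
          (fun acc dte => if mn ≤ dte then acc ++ [dte] else acc) ([] : List Int))))
      (fun x => x)
    = PySem.List.sorted (pvCandidates.filter (fun v => decide (mn ≤ v ∧ v ≤ mx))) (fun x => x)
  set p : Int → Bool := fun v => decide (mn ≤ v ∧ v ≤ mx) with hp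
  rw [pyRange_weekly (min (mx + 1) 35) (min_le_right _ _)]
  rw [PySem.List.foldl_append_ite_eq_filter, PySem.List.foldl_append_ite_eq_filter]
  rw [List.nil_append, List.filter_filter, filter_weekly mn mx, ← hp, ← List.filter_append]
  have hcand : ([7, 14, 21, 28] : List Int) ++ [30, 45, 60] = pvCandidates := by decide
  rw [hcand]
  have hnd : (pvCandidates.filter p).Nodup :=
    List.Nodup.sublist List.filter_sublist (by decide)
  rw [PySem.Set.ofList_eq_self_of_nodup _ hnd]
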